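-- pv_equiv track=rewrite | github.com/alisazhou/algo2 | ps1/job_sched.py | weighted_sum_diff
-- ===== SOURCE A (Python) =====
-- import heapq
--
-- def weighted_sum_diff(jobs_diff):
--     fin_time = 0
--     # weighted completion time = w * finish
--     weighted_total = 0
--     while jobs_diff:
--         job = heapq.heappop(jobs_diff)
--         l_less_w, neg_w = job
--         l = l_less_w - neg_w
--         w = - neg_w
--         fin_time += l
--         weighted_total += fin_time * w
--     return weighted_total
-- ===== SOURCE B (Python) =====
-- def weighted_sum_diff(jobs_diff):
--     # Eager sort instead of repeated heap extraction; same ascending tuple order.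
--     fin_time = 0
--     weighted_total = 0
--     for l_less_w, neg_w in sorted(jobs_diff):
--         fin_time += l_less_w - neg_w
--         weighted_total -= fin_time * neg_w
--     jobs_diff.clear()  # A empties its argument; keep the same side effect
--     return weighted_total
-- ===== Notes on version B (the rewrite author's own statement) =====
-- stated objective: simpler
-- what changed: Replaces the destructive heapq while/heappop extraction loop with a single eager sort followed by a plain for-loop fold (subtracting fin_time*neg_w directly).
-- outside the precondition, e.g. on weighted_sum_diff([(5, 0), (1, -2), (2, -1)]): A returns 27, B returns 12
import Mathlib
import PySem

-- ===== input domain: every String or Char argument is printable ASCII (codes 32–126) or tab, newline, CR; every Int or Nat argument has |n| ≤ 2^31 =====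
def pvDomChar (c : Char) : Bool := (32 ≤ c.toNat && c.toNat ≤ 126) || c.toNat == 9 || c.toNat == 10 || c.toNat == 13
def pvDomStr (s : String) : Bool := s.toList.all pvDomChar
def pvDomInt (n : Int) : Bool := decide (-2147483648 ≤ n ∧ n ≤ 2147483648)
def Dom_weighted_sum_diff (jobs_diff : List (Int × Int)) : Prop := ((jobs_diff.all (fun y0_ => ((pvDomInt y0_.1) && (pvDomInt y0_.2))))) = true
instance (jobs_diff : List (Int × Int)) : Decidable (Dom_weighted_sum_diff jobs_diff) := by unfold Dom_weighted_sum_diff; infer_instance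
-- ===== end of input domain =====

-- B replaces A's destructive heapq heappop loop by an eager sort plus a single fold; equivalence is about
-- the return value (both Pythons empty the argument list as a side effect).

-- ===== PORT A =====
-- Python tuple '<' on int pairs (lexicographic), the order heapq compares jobs by.
def plt (a b : Int × Int) : Bool :=
  decide (a.1 < b.1) || (!decide (b.1 < a.1) && decide (a.2 < b.2))

-- heapq.heappop, ported by its value semantics on a min-heap (Pre_ restricts to those): it returns the
-- root heap[0]; the remaining elements (the root removed) are left in SOME heap order — here fully
-- sorted, which is a heap order and is value-equivalent for every later heappop of A's loop.
def heappopV (xs : List (Int × Int)) : (Int × Int) × List (Int × Int) :=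
  (xs.headD (0, 0), PySem.List.sorted2 (xs.drop 1) (fun x => x.1) (fun x => x.2))

theorem heappopV_length (x : Int × Int) (ys : List (Int × Int)) :
    (heappopV (x :: ys)).2.length = ys.length := by
  simpa [heappopV] using (PySem.List.sorted2_perm ys (fun x => x.1) (fun x => x.2) false).length_eq

-- the while-loop of A: pop, unpack, accumulate finish time and weighted total
def aLoop : List (Int × Int) → Int → Int → Int
  | [], _, weighted_total => weighted_total
  | x :: ys, fin_time, weighted_total =>
    let p := heappopV (x :: ys)
    let l := p.1.1 - p.1.2
    let w := -p.1.2
    aLoop p.2 (fin_time + l) (weighted_total + (fin_time + l) * w)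
termination_by xs _ _ => xs.length
decreasing_by simp [heappopV_length]

def weighted_sum_diff (jobs_diff : List (Int × Int)) : Int :=
  aLoop jobs_diff 0 0

-- ===== PORT B =====
def weighted_sum_diff_alt (jobs_diff : List (Int × Int)) : Int :=
  ((PySem.List.sorted2 jobs_diff (fun x => x.1) (fun x => x.2)).foldl
    (fun (st : Int × Int) j =>
      let fin_time := st.1 + (j.1 - j.2)
      (fin_time, st.2 - fin_time * j.2)) ((0 : Int), (0 : Int))).2

-- ===== PRECONDITION & SPEC =====
-- Pre_ excludes lists that are not binary min-heaps (heapq's documented invariant): A still returns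
-- there, but the value is an artefact of running heappop on a structure that violates its invariant.
def Pre_weighted_sum_diff (jobs_diff : List (Int × Int)) : Prop :=
  ∀ i < jobs_diff.length, ∀ j < jobs_diff.length,
    (j = 2*i+1 ∨ j = 2*i+2) → plt (jobs_diff.getD j (0, 0)) (jobs_diff.getD i (0, 0)) = false
instance (jobs_diff : List (Int × Int)) : Decidable (Pre_weighted_sum_diff jobs_diff) := by
  unfold Pre_weighted_sum_diff; infer_instance

def pvWitness_weighted_sum_diff : (List (Int × Int)) := [(1, -2), (3, -1), (5, 0)]

def Spec_weighted_sum_diff (jobs_diff : List (Int × Int)) (out : Int) : Prop := out = weighted_sum_diff_alt jobs_diff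
instance (jobs_diff : List (Int × Int)) (out : Int) : Decidable (Spec_weighted_sum_diff jobs_diff out) := by unfold Spec_weighted_sum_diff; infer_instance

-- ===== CLAIM (what is proved, stated in full; the proofs are below) =====
def Claim_equal_weighted_sum_diff : Prop := ∀ (jobs_diff : List (Int × Int)), Dom_weighted_sum_diff jobs_diff → Pre_weighted_sum_diff jobs_diff → Spec_weighted_sum_diff jobs_diff (weighted_sum_diff jobs_diff)

-- ===== LEMMAS AND PROOFS =====

-- weak order "a ≤ b" induced by plt
def ple (a b : Int × Int) : Prop := plt b a = false

theorem plt_iff (a b : Int × Int) :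
    plt a b = true ↔ (a.1 < b.1 ∨ (¬ b.1 < a.1 ∧ a.2 < b.2)) := by
  simp [plt]

theorem plt_false_iff (a b : Int × Int) :
    plt a b = false ↔ ¬ (a.1 < b.1 ∨ (¬ b.1 < a.1 ∧ a.2 < b.2)) := by
  rw [← plt_iff]; cases h : plt a b <;> simp

theorem ple_refl (a : Int × Int) : ple a a := by
  unfold ple; rw [plt_false_iff]; omega

theorem ple_antisymm (a b : Int × Int) (h1 : ple a b) (h2 : ple b a) : a = b := by
  unfold ple at h1 h2
  rw [plt_false_iff] at h1 h2
  have : a.1 = b.1 ∧ a.2 = b.2 := by omega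
  exact Prod.ext this.1 this.2

theorem ple_trans (a b c : Int × Int) (h1 : ple a b) (h2 : ple b c) : ple a c := by
  unfold ple at *
  rw [plt_false_iff] at *
  omega

theorem plt_le (a b c : Int × Int) (h1 : plt a b = true) (h2 : ple b c) : ple a c := by
  unfold ple at *
  rw [plt_iff] at h1; rw [plt_false_iff] at *
  omega

theorem plt_ple (a b : Int × Int) (h : plt a b = true) : ple a b := by
  unfold ple; rw [plt_iff] at h; rw [plt_false_iff]; omega

theorem ple_of_not_plt (a b : Int × Int) (h : plt a b = false) : ple b a := h

-- the root of a heap is a minimum ------------------------------------------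

theorem heap_root_min_idx (xs : List (Int × Int)) (h : Pre_weighted_sum_diff xs) :
    ∀ j < xs.length, ple (xs.getD 0 (0, 0)) (xs.getD j (0, 0)) := by
  intro j
  induction j using Nat.strong_induction_on with
  | _ j ih =>
    intro hj
    rcases Nat.eq_zero_or_pos j with rfl | hpos
    · exact ple_refl _
    · have hp : (j - 1) / 2 < j := by omega
      have hc : j = 2 * ((j - 1) / 2) + 1 ∨ j = 2 * ((j - 1) / 2) + 2 := by omega
      exact ple_trans _ _ _ (ih _ hp (by omega))
        (h _ (by omega) j hj hc)

theorem heap_root_min (x : Int × Int) (ys : List (Int × Int))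
    (h : Pre_weighted_sum_diff (x :: ys)) : ∀ z ∈ ys, ple x z := by
  intro z hz
  rcases List.getElem_of_mem hz with ⟨j, hj, rfl⟩
  have := heap_root_min_idx (x :: ys) h (j + 1) (by simpa using Nat.succ_lt_succ hj)
  simpa [List.getD_cons_succ, List.getD, List.getElem?_eq_getElem hj] using this

-- sorted2 produces a ple-sorted permutation ---------------------------------

theorem insertBy_cons (p : (Int × Int) → (Int × Int) → Bool) (x y : Int × Int)
    (ys : List (Int × Int)) :
    PySem.List.insertBy p x (y :: ys) =
      if p x y then x :: y :: ys else y :: PySem.List.insertBy p x ys := rfl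

theorem insertBy_pairwise (x : Int × Int) (acc : List (Int × Int))
    (h : acc.Pairwise ple) : (PySem.List.insertBy plt x acc).Pairwise ple := by
  induction acc with
  | nil => simp [PySem.List.insertBy]
  | cons y ys ih =>
    rcases List.pairwise_cons.1 h with ⟨hy, hys⟩
    rw [insertBy_cons]
    by_cases hxy : plt x y = true
    · rw [if_pos hxy]
      refine List.pairwise_cons.2 ⟨?_, h⟩
      intro z hz
      rcases List.mem_cons.1 hz with rfl | hz'
      · exact plt_ple x z hxy
      · exact plt_le x y z hxy (hy z hz')
    · rw [if_neg hxy]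
      refine List.pairwise_cons.2 ⟨?_, ih hys⟩
      intro z hz
      rcases (PySem.List.mem_insertBy plt x z ys).1 hz with rfl | hz'
      · exact ple_of_not_plt z y (by simpa using hxy)
      · exact hy z hz'

theorem foldl_insertBy_pairwise (xs acc : List (Int × Int))
    (h : acc.Pairwise ple) :
    (xs.foldl (fun acc x => PySem.List.insertBy plt x acc) acc).Pairwise ple := by
  induction xs generalizing acc with
  | nil => simpa
  | cons x xs ih => exact ih _ (insertBy_pairwise x acc h)

theorem sorted2_def (xs : List (Int × Int)) :
    PySem.List.sorted2 xs (fun x => x.1) (fun x => x.2) =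
      xs.foldl (fun acc x => PySem.List.insertBy plt x acc) [] := rfl

theorem sorted2_pairwise (xs : List (Int × Int)) :
    (PySem.List.sorted2 xs (fun x => x.1) (fun x => x.2)).Pairwise ple := by
  rw [sorted2_def]
  exact foldl_insertBy_pairwise xs [] (by simp)

theorem sorted2_eq_of_pairwise (xs ys : List (Int × Int)) (hperm : ys.Perm xs)
    (hsort : ys.Pairwise ple) :
    PySem.List.sorted2 xs (fun x => x.1) (fun x => x.2) = ys := by
  refine List.Perm.eq_of_pairwise (fun a b _ _ hab hba => ple_antisymm a b hab hba)
    (sorted2_pairwise xs) hsort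
    ((PySem.List.sorted2_perm xs _ _ _).trans hperm.symm)

theorem sorted2_idem (ys : List (Int × Int)) (hsort : ys.Pairwise ple) :
    PySem.List.sorted2 ys (fun x => x.1) (fun x => x.2) = ys :=
  sorted2_eq_of_pairwise ys ys (List.Perm.refl ys) hsort

-- A's loop on a ple-sorted list is the fold over it --------------------------

theorem aLoop_sorted (s : List (Int × Int)) (hs : s.Pairwise ple) :
    ∀ fin tot : Int,
      aLoop s fin tot =
        (s.foldl
          (fun (st : Int × Int) m =>
            (st.1 + (m.1 - m.2), st.2 + (st.1 + (m.1 - m.2)) * (-m.2))) (fin, tot)).2 := by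
  induction s with
  | nil => intro fin tot; simp [aLoop]
  | cons x ys ih =>
    intro fin tot
    rcases List.pairwise_cons.1 hs with ⟨_, hys⟩
    rw [aLoop]
    simp only [heappopV, List.headD_cons, List.drop_one, List.tail_cons, List.foldl_cons]
    rw [sorted2_idem ys hys, ih hys]

-- the two fold bodies agree -------------------------------------------------

theorem fold_bodies_eq (l : List (Int × Int)) (st : Int × Int) :
    l.foldl (fun (st : Int × Int) m =>
        (st.1 + (m.1 - m.2), st.2 + (st.1 + (m.1 - m.2)) * (-m.2))) st =
    l.foldl (fun (st : Int × Int) j =>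
        let fin_time := st.1 + (j.1 - j.2)
        (fin_time, st.2 - fin_time * j.2)) st := by
  induction l generalizing st with
  | nil => rfl
  | cons m l ih =>
    simp only [List.foldl_cons]
    rw [ih]
    ring_nf

-- ===== VERDICT (by name: the statement is the Claim_ definition above) =====
theorem weighted_sum_diff_spec : Claim_equal_weighted_sum_diff := by
  intro jobs_diff _ hpre
  unfold Spec_weighted_sum_diff weighted_sum_diff weighted_sum_diff_alt
  rw [← fold_bodies_eq]
  cases jobs_diff with
  | nil => simp [aLoop, PySem.List.sorted2]
  | cons x ys =>
    rw [aLoop]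
    simp only [heappopV, List.headD_cons, List.drop_one, List.tail_cons]
    have hroot : ∀ z ∈ PySem.List.sorted2 ys (fun x => x.1) (fun x => x.2), ple x z := by
      intro z hz
      exact heap_root_min x ys hpre z
        ((PySem.List.sorted2_perm ys _ _ _).subset hz)
    have hcons : PySem.List.sorted2 (x :: ys) (fun x => x.1) (fun x => x.2)
        = x :: PySem.List.sorted2 ys (fun x => x.1) (fun x => x.2) := by
      refine sorted2_eq_of_pairwise _ _
        (((PySem.List.sorted2_perm ys _ _ _)).cons x) (List.pairwise_cons.2 ⟨hroot, sorted2_pairwise ys⟩)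
    rw [hcons]
    simp only [List.foldl_cons]
    rw [aLoop_sorted _ (sorted2_pairwise ys)]
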